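-- pv_equiv track=rewrite | github.com/TuanAnhNguyenCo/CodePractice | Medium/Lesson1/FindSpecialNumber.py | find_special_prime
-- ===== SOURCE A (Python) =====
-- import math as mt
--
-- def isPrime(n): #Kiểm tra số nguyên tố
--     n1 = int(mt.sqrt(n))
--     for i in range(2,n1+1):
--         if n%i==0:
--             return False
--     return True
--
-- def FindPrime(k,x,n,SpecialPrime,odd):
--     for i in odd:
--         q = x # q này dùng khi mà nó quay lui lại vị trí này và lặp vòng lặp mới thì ta sẽ gán lại x = q
--         x = x*10 + i
--         if x <= n: # Nếu nhỏ hơn n thì xét tiếp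
--             if isPrime(x)==True: #Nếu là số Nguyên tố thì sẽ thêm vào list
--                 SpecialPrime.append(x)
--                 FindPrime(k+1,x,n,SpecialPrime,odd) # Gọi đệ quy đến thằng tiếp theo
--         else: # Nếu mà x > n thì hiển nhiên là các giá trị sau trong mảng odd cũng không thoả mãn
--             break # Nên là sẽ quay lui về thời điểm k = k - 1
--         x = q
--
-- def find_special_prime(n):
--     odd = [1,3,5,7,9]
--     prime = [2,3,5,7]
--     SpecialPrime = []
--     for i in prime:
--         if i <=n: # Nếu i <= n thì sẽ thêm và gọi đệ quy
--             SpecialPrime.append(i)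
--             FindPrime(1,i,n,SpecialPrime,odd)
--     SpecialPrime.sort() # sắp xếp lại danh sách
--     return SpecialPrime
-- ===== SOURCE B (Python) =====
-- import math as mt
--
-- def isPrime(n):
--     i = 2
--     while i * i <= n:
--         if n % i == 0:
--             return False
--         i += 1
--     return True
--
-- def find_special_prime(n):
--     # explicit-stack DFS instead of recursion; same preorder, then sort
--     stack = [p for p in (7, 5, 3, 2) if p <= n]
--     result = []
--     while stack:
--         x = stack.pop()
--         result.append(x)
--         children = []
--         for d in (1, 3, 5, 7, 9):
--             y = x * 10 + d
--             if y > n: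
--                 break
--             if isPrime(y):
--                 children.append(y)
--         stack.extend(reversed(children))
--     result.sort()
--     return result
-- ===== Notes on version B (the rewrite author's own statement) =====
-- stated objective: alternative
-- what changed: The recursive DFS over prefix-prime chains is replaced by an iterative explicit-stack worklist (pop a node, emit it, push its surviving children), and the sqrt-bounded trial division is replaced by an i*i<=n loop; same preorder emission, then sort.
import Mathlib
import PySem

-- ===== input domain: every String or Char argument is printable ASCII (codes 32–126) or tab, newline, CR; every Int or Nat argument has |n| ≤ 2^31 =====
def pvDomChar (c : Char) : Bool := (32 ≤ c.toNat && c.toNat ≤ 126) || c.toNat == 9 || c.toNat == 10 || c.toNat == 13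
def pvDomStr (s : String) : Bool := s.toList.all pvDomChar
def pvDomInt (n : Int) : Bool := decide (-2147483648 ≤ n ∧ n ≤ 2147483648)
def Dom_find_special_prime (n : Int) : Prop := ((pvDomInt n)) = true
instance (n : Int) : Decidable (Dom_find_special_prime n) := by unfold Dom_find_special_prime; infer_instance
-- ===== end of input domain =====

-- B replaces A's recursive DFS by an explicit-stack worklist (same preorder, then sort); alternative decomposition, no speed claim.

-- ===== PORT A =====
-- isPrime: int(mt.sqrt(n)) is exactly Nat.sqrt n.toNat on the nonnegative arguments this program
-- ever passes (all < 2^32, where the float sqrt is exact enough); the early-return-False for-loop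
-- over range(2, n1+1) is the .all below.
def pyIsPrime (n : Int) : Bool :=
  let n1 : Int := ((Nat.sqrt n.toNat : Int))
  (PySem.List.pyRange 2 (n1 + 1) 1).all (fun i => !(PySem.Int.mod n i == 0))

-- FindPrime: the for-loop over `odd` is recursion on `rem` (the not-yet-visited suffix of odd);
-- the recursive Python call FindPrime(k+1, x, n, SpecialPrime, odd) restarts the loop at `odd`.
-- `fuel` is only a totality guard (Python's recursion depth is bounded since x grows tenfold).
def findPrimeLoop (fuel : Nat) (k x n : Int) (sp : List Int) (odd rem : List Int) : List Int :=
  match fuel, rem with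
  | 0, _ => sp
  | _, [] => sp
  | f + 1, i :: rest =>
    let y := x * 10 + i
    if y ≤ n then
      let sp' := if pyIsPrime y then findPrimeLoop f (k + 1) y n (sp ++ [y]) odd odd else sp
      findPrimeLoop (f + 1) k x n sp' odd rest
    else sp
termination_by (fuel, rem.length)

def findPrime (fuel : Nat) (k x n : Int) (sp odd : List Int) : List Int :=
  findPrimeLoop fuel k x n sp odd odd

def find_special_prime (n : Int) : List Int :=
  let odd : List Int := [1, 3, 5, 7, 9]
  let prime : List Int := [2, 3, 5, 7]
  let sp := prime.foldl
    (fun sp i => if i ≤ n then findPrime (n.toNat + 2) 1 i n (sp ++ [i]) odd else sp) []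
  PySem.List.sorted sp (fun x => x) false

-- ===== PORT B =====
-- trial-division loop `while i*i <= n`
def altIsPrimeLoop (m i : Int) : Bool :=
  if h : i * i ≤ m then
    if PySem.Int.mod m i == 0 then false else altIsPrimeLoop m (i + 1)
  else true
termination_by (m + 2 - i).toNat
decreasing_by
  have hi : i ≤ m + 1 := by nlinarith [mul_self_nonneg (i - 1)]
  omega

def altIsPrime (n : Int) : Bool := altIsPrimeLoop n 2

-- the inner for/break/append loop building `children`
def altChildren (n x : Int) (digits : List Int) : List Int :=
  match digits with
  | [] => []
  | d :: rest =>
    let y := x * 10 + d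
    if n < y then []                                   -- break
    else if altIsPrime y then y :: altChildren n x rest
    else altChildren n x rest

theorem altChildren_mem (n x : Int) (digits : List Int) (y : Int)
    (hy : y ∈ altChildren n x digits) : y ≤ n ∧ ∃ d ∈ digits, y = x * 10 + d := by
  induction digits with
  | nil => simp [altChildren] at hy
  | cons d rest ih =>
    simp only [altChildren] at hy
    split_ifs at hy with h1 h2
    · simp at hy
    · rcases List.mem_cons.mp hy with h | h
      · subst h; exact ⟨by omega, d, by simp⟩
      · obtain ⟨hle, e, he, hev⟩ := ih h
        exact ⟨hle, e, by simp [he], hev⟩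
    · obtain ⟨hle, e, he, hev⟩ := ih hy
      exact ⟨hle, e, by simp [he], hev⟩

theorem altChildren_length (n x : Int) (digits : List Int) :
    (altChildren n x digits).length ≤ digits.length := by
  induction digits with
  | nil => simp [altChildren]
  | cons d rest ih =>
    simp only [altChildren]
    split_ifs <;> simp <;> omega

-- bound used only by altLoop's termination measure
theorem altChildren_measure (n x : Int) (hx : 1 ≤ x) :
    ((altChildren n x [1, 3, 5, 7, 9]).map (fun z => 6 ^ ((n + 1 - z).toNat))).sum
      < 6 ^ ((n + 1 - x).toNat) := by
  by_cases hxn : x ≤ n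
  · set A := (n + 1 - x).toNat with hA
    have hA1 : 1 ≤ A := by omega
    have hbound : ∀ w ∈ (altChildren n x [1, 3, 5, 7, 9]).map
        (fun z => 6 ^ ((n + 1 - z).toNat)), w ≤ 6 ^ (A - 1) := by
      intro w hw
      obtain ⟨y, hy, rfl⟩ := List.mem_map.mp hw
      obtain ⟨hle, d, hd, rfl⟩ := altChildren_mem n x _ y hy
      have hd1 : 1 ≤ d := by simp at hd; omega
      have : (n + 1 - (x * 10 + d)).toNat ≤ A - 1 := by
        have : x < x * 10 + d := by nlinarith
        omega
      exact Nat.pow_le_pow_right (by norm_num) this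
    have hsum : ((altChildren n x [1, 3, 5, 7, 9]).map
        (fun z => 6 ^ ((n + 1 - z).toNat))).sum
        ≤ ((altChildren n x [1, 3, 5, 7, 9]).map (fun z => 6 ^ ((n + 1 - z).toNat))).length
            * 6 ^ (A - 1) := by
      simpa [smul_eq_mul] using List.sum_le_card_nsmul _ _ hbound
    have hlen : ((altChildren n x [1, 3, 5, 7, 9]).map
        (fun z => 6 ^ ((n + 1 - z).toNat))).length ≤ 5 := by
      simpa using altChildren_length n x [1, 3, 5, 7, 9]
    calc ((altChildren n x [1, 3, 5, 7, 9]).map (fun z => 6 ^ ((n + 1 - z).toNat))).sum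
        ≤ _ * 6 ^ (A - 1) := hsum
      _ ≤ 5 * 6 ^ (A - 1) := Nat.mul_le_mul_right _ hlen
      _ < 6 * 6 ^ (A - 1) := by have : 0 < 6 ^ (A - 1) := Nat.pow_pos (by norm_num); omega
      _ = 6 ^ A := by rw [← pow_succ']; congr 1; omega
  · have : altChildren n x [1, 3, 5, 7, 9] = [] := by
      simp only [altChildren]
      rw [if_pos (by omega : n < x * 10 + 1)]
    rw [this]
    simp only [List.map_nil, List.sum_nil]
    exact Nat.pow_pos (by norm_num : 0 < 6)

-- the while-loop over the worklist; Lean's list head is the Python stack's top (the end of the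
-- Python list), so pop = head and extend(reversed(children)) = prepend children in order.
-- The `1 ≤ x` test is a totality guard only: every stacked value is a positive integer.
def altLoop (n : Int) (stack res : List Int) : List Int :=
  match stack with
  | [] => res
  | x :: rest =>
    if h : 1 ≤ x then
      altLoop n (altChildren n x [1, 3, 5, 7, 9] ++ rest) (res ++ [x])
    else
      altLoop n rest (res ++ [x])
termination_by (stack.map (fun z => 6 ^ ((n + 1 - z).toNat))).sum
decreasing_by
  · simp only [List.map_append, List.sum_append, List.map_cons, List.sum_cons]
    have := altChildren_measure n x h
    omega
  · simp only [List.map_cons, List.sum_cons]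
    have : 0 < 6 ^ ((n + 1 - x).toNat) := Nat.pow_pos (by norm_num)
    omega

def find_special_prime_alt (n : Int) : List Int :=
  let stack := ([2, 3, 5, 7] : List Int).filter (fun p => p ≤ n)
  PySem.List.sorted (altLoop n stack []) (fun x => x) false

-- ===== PRECONDITION & SPEC =====
def Spec_find_special_prime (n : Int) (out : List Int) : Prop := out = find_special_prime_alt n
instance (n : Int) (out : List Int) : Decidable (Spec_find_special_prime n out) := by unfold Spec_find_special_prime; infer_instance

-- ===== CLAIM (what is proved, stated in full; the proofs are below) =====
def Claim_equal_find_special_prime : Prop := ∀ (n : Int), Dom_find_special_prime n → Spec_find_special_prime n (find_special_prime n)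

-- ===== LEMMAS AND PROOFS =====

theorem altIsPrimeLoop_char (m : Int) : ∀ i : Int, 2 ≤ i →
    (altIsPrimeLoop m i = true ↔ ∀ j : Int, i ≤ j → j * j ≤ m → PySem.Int.mod m j ≠ 0) := by
  intro i
  fun_induction altIsPrimeLoop m i with
  | case1 i h hmod =>
    intro h2
    simp only [Bool.false_eq_true, false_iff]
    intro hall
    exact hall i le_rfl h (by simpa using hmod)
  | case2 i h hmod ih =>
    intro h2
    rw [ih (by omega)]
    constructor
    · intro hall j hij hjj
      rcases eq_or_lt_of_le hij with rfl | hlt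
      · simpa using hmod
      · exact hall j (by omega) hjj
    · intro hall j hij hjj
      exact hall j (by omega) hjj
  | case3 i h =>
    intro h2
    simp only [true_iff]
    intro j hij hjj
    exact absurd (le_trans (mul_self_le_mul_self (by omega) hij) hjj) h

theorem sqrt_bridge (m : Int) (i : Int) (h2 : 2 ≤ i) :
    (i ≤ ((Nat.sqrt m.toNat : Int)) ↔ i * i ≤ m) := by
  by_cases hm : 0 ≤ m
  · have h0 : 0 ≤ i := by omega
    constructor
    · intro h
      have h1 : i.toNat ≤ Nat.sqrt m.toNat := by omega
      have h3 := Nat.le_sqrt.mp h1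
      have h4 : ((i.toNat * i.toNat : Nat) : Int) ≤ ((m.toNat : Nat) : Int) := by exact_mod_cast h3
      push_cast at h4
      rw [Int.toNat_of_nonneg h0, Int.toNat_of_nonneg hm] at h4
      exact h4
    · intro h
      have h4 : i.toNat * i.toNat ≤ m.toNat := by
        have : ((i.toNat * i.toNat : Nat) : Int) ≤ ((m.toNat : Nat) : Int) := by
          push_cast
          rw [Int.toNat_of_nonneg h0, Int.toNat_of_nonneg hm]
          exact h
        exact_mod_cast this
      have := Nat.le_sqrt.mpr h4
      omega
  · have h0 : m.toNat = 0 := by omega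
    rw [h0]
    simp only [Nat.sqrt_zero, Nat.cast_zero]
    constructor
    · intro h; omega
    · intro h; nlinarith

theorem isPrime_eq (m : Int) : pyIsPrime m = altIsPrime m := by
  rw [Bool.eq_iff_iff]
  unfold pyIsPrime altIsPrime
  rw [altIsPrimeLoop_char m 2 le_rfl]
  rw [List.all_eq_true]
  constructor
  · intro hall j h2j hjj
    have hmem : j ∈ PySem.List.pyRange 2 (((Nat.sqrt m.toNat : Int)) + 1) 1 := by
      rw [PySem.List.mem_pyRange_one]
      have := (sqrt_bridge m j h2j).mpr hjj
      omega
    simpa using hall j hmem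
  · intro hall j hmem
    rw [PySem.List.mem_pyRange_one] at hmem
    have h2j : 2 ≤ j := hmem.1
    have hjj : j * j ≤ m := (sqrt_bridge m j h2j).mp (by omega)
    simpa using hall j h2j hjj

-- A's children of x among remaining digits `rem`: takeWhile ≤ n, keep the primes
def childFrom (n x : Int) (rem : List Int) : List Int :=
  match rem with
  | [] => []
  | i :: rest =>
    let y := x * 10 + i
    if y ≤ n then
      if pyIsPrime y then y :: childFrom n x rest else childFrom n x rest
    else []

theorem childFrom_eq_alt (n x : Int) (rem : List Int) :
    childFrom n x rem = altChildren n x rem := by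
  induction rem with
  | nil => rfl
  | cons d rest ih =>
    simp only [childFrom, altChildren]
    by_cases h : x * 10 + d ≤ n
    · rw [if_pos h, if_neg (by omega : ¬ n < x * 10 + d), isPrime_eq, ih]
    · rw [if_neg h, if_pos (by omega : n < x * 10 + d)]

-- the subtree preorder list below x (x itself excluded), with fuel
def desc (n : Int) (fuel : Nat) (x : Int) : List Int :=
  match fuel with
  | 0 => []
  | f + 1 => (childFrom n x [1, 3, 5, 7, 9]).flatMap (fun y => y :: desc n f y)

def Dsc (n x : Int) : List Int := desc n (n.toNat + 1) x

theorem childFrom_mem (n x : Int) (rem : List Int) (y : Int)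
    (hy : y ∈ childFrom n x rem) : y ≤ n ∧ ∃ d ∈ rem, y = x * 10 + d := by
  rw [childFrom_eq_alt] at hy
  exact altChildren_mem n x rem y hy

theorem childFrom_nil_of_ge (n x : Int) (hx : 1 ≤ x) (hxn : n ≤ x) :
    childFrom n x [1, 3, 5, 7, 9] = [] := by
  simp only [childFrom]
  rw [if_neg (by omega : ¬ x * 10 + 1 ≤ n)]

theorem desc_fuel (n : Int) : ∀ (cnt : Nat) (x : Int) (f g : Nat), (n - x).toNat ≤ cnt →
    1 ≤ x → (n - x).toNat ≤ f → (n - x).toNat ≤ g → desc n f x = desc n g x := by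
  intro cnt
  induction cnt with
  | zero =>
    intro x f g hc hx hf hg
    have hxn : n ≤ x := by omega
    match f, g with
    | 0, 0 => rfl
    | 0, g + 1 => simp [desc, childFrom_nil_of_ge n x hx hxn]
    | f + 1, 0 => simp [desc, childFrom_nil_of_ge n x hx hxn]
    | f + 1, g + 1 => simp [desc, childFrom_nil_of_ge n x hx hxn]
  | succ c ih =>
    intro x f g hc hx hf hg
    by_cases hxn : n ≤ x
    · match f, g with
      | 0, 0 => rfl
      | 0, g + 1 => simp [desc, childFrom_nil_of_ge n x hx hxn]
      | f + 1, 0 => simp [desc, childFrom_nil_of_ge n x hx hxn]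
      | f + 1, g + 1 => simp [desc, childFrom_nil_of_ge n x hx hxn]
    · have hA : 1 ≤ (n - x).toNat := by omega
      obtain ⟨f', rfl⟩ : ∃ f', f = f' + 1 := ⟨f - 1, by omega⟩
      obtain ⟨g', rfl⟩ : ∃ g', g = g' + 1 := ⟨g - 1, by omega⟩
      · simp only [desc]
        apply List.flatMap_congr  -- may need a local congr lemma
        intro y hy
        obtain ⟨hle, d, hd, rfl⟩ := childFrom_mem n x _ y hy
        have hd1 : 1 ≤ d := by simp at hd; omega
        have hxy : x < x * 10 + d := by nlinarith
        have : (n - (x * 10 + d)).toNat ≤ c := by omega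
        rw [ih (x * 10 + d) f' g' this (by omega) (by omega) (by omega)]

theorem Dsc_unfold (n x : Int) (hx : 1 ≤ x) :
    Dsc n x = (childFrom n x [1, 3, 5, 7, 9]).flatMap (fun y => y :: Dsc n y) := by
  show desc n (n.toNat + 1) x = _
  simp only [desc]
  apply List.flatMap_congr
  intro y hy
  obtain ⟨hle, d, hd, rfl⟩ := childFrom_mem n x _ y hy
  have hd1 : 1 ≤ d := by simp at hd; omega
  rw [desc_fuel n (n - (x * 10 + d)).toNat (x * 10 + d) n.toNat (n.toNat + 1) le_rfl
    (by omega) (by omega) (by omega)]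
  rfl

theorem loopA_eq (n : Int) : ∀ (f : Nat) (k x : Int) (sp rem : List Int),
    findPrimeLoop (f + 1) k x n sp [1, 3, 5, 7, 9] rem
      = sp ++ (childFrom n x rem).flatMap (fun y => y :: desc n f y) := by
  intro f
  induction f using Nat.strong_induction_on with
  | _ f IHf =>
    intro k x sp rem
    induction rem generalizing sp k with
    | nil => simp [findPrimeLoop, childFrom]
    | cons i rest ih =>
      rw [findPrimeLoop]
      simp only [childFrom]
      by_cases hle : x * 10 + i ≤ n
      · simp only [if_pos hle]
        by_cases hp : pyIsPrime (x * 10 + i)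
        · simp only [if_pos hp]
          match f with
          | 0 =>
            have h0 : findPrimeLoop 0 (k + 1) (x * 10 + i) n (sp ++ [x * 10 + i])
                [1,3,5,7,9] [1,3,5,7,9] = sp ++ [x * 10 + i] := by rw [findPrimeLoop]
            rw [h0, ih]
            simp [desc]
          | g + 1 =>
            rw [IHf g (by omega), ih]
            simp only [desc, List.flatMap_cons]
            simp [List.append_assoc]
        · simp only [if_neg hp]
          rw [ih]
      · simp only [if_neg hle]
        simp

theorem B_loop (n : Int) : ∀ (stack res : List Int), (∀ x ∈ stack, 1 ≤ x) →
    altLoop n stack res = res ++ stack.flatMap (fun x => x :: Dsc n x) := by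
  intro stack res
  fun_induction altLoop n stack res with
  | case1 res => intro _; simp
  | case2 res x rest hx ih =>
    intro h
    have hx1 : (1:Int) ≤ x := h x (by simp)
    have hch : ∀ y ∈ altChildren n x [1, 3, 5, 7, 9], (1:Int) ≤ y := by
      intro y hy
      obtain ⟨_, d, hd, rfl⟩ := altChildren_mem n x _ y hy
      have : 1 ≤ d := by simp at hd; omega
      omega
    rw [ih (by
      intro y hy
      rcases List.mem_append.mp hy with hy | hy
      · exact hch y hy
      · exact h y (by simp [hy]))]
    have hD : x :: Dsc n x = [x] ++ (altChildren n x [1, 3, 5, 7, 9]).flatMap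
        (fun y => y :: Dsc n y) := by
      rw [Dsc_unfold n x hx1, childFrom_eq_alt]
      rfl
    simp [hD, List.append_assoc]
  | case3 res x rest hx ih =>
    intro h
    exact absurd (h x (by simp)) hx

theorem A_pre (n : Int) : ∀ (seeds : List Int) (sp : List Int), (∀ i ∈ seeds, 1 ≤ i) →
    seeds.foldl (fun sp i => if i ≤ n then
        findPrime (n.toNat + 2) 1 i n (sp ++ [i]) [1, 3, 5, 7, 9] else sp) sp
      = sp ++ (seeds.filter (fun i => i ≤ n)).flatMap (fun i => i :: Dsc n i) := by
  intro seeds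
  induction seeds with
  | nil => simp
  | cons i rest ih =>
    intro sp hmem
    have hi : (1:Int) ≤ i := hmem i (by simp)
    simp only [List.foldl_cons, List.filter_cons]
    by_cases h : i ≤ n
    · rw [if_pos h]
      rw [show findPrime (n.toNat + 2) 1 i n (sp ++ [i]) [1,3,5,7,9]
          = findPrimeLoop (n.toNat + 1 + 1) 1 i n (sp ++ [i]) [1,3,5,7,9] [1,3,5,7,9] from rfl]
      rw [loopA_eq]
      rw [ih _ (fun j hj => hmem j (by simp [hj]))]
      rw [show (fun y => y :: desc n (n.toNat + 1) y) = (fun y => y :: Dsc n y) from rfl]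
      rw [← Dsc_unfold n i hi]
      simp [h]
    · rw [if_neg h]
      rw [ih _ (fun j hj => hmem j (by simp [hj]))]
      simp [h]

-- ===== VERDICT (by name: the statement is the Claim_ definition above) =====
theorem find_special_prime_spec : Claim_equal_find_special_prime := by
  intro n _
  show PySem.List.sorted
      (List.foldl (fun sp i => if i ≤ n then
        findPrime (n.toNat + 2) 1 i n (sp ++ [i]) [1, 3, 5, 7, 9] else sp) [] [2, 3, 5, 7])
      (fun x => x) false
    = PySem.List.sorted
      (altLoop n (List.filter (fun p => decide (p ≤ n)) [2, 3, 5, 7]) []) (fun x => x) false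
  rw [A_pre n [2,3,5,7] [] (by intro i hi; fin_cases hi <;> norm_num)]
  rw [B_loop n _ [] (by
    intro x hx
    have := (List.mem_filter.mp hx).1
    fin_cases this <;> norm_num)]
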